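-- pv_equiv track=rewrite | github.com/rojachowdhury1/adversarialaitest | interactive_analysis.py | is_suspicious
-- ===== SOURCE A (Python) =====
-- def is_suspicious(prompt):
--     suspicious_keywords = [
--         "debug",
--         "maintenance",
--         "internal variables",
--         "hidden configuration",
--         "system prompt",
--         "secret_token",
--         "secret token",
--         "override",
--         "ignore previous"
--     ]
--     prompt_lower = prompt.lower()
--     return any(k in prompt_lower for k in suspicious_keywords)
-- ===== SOURCE B (Python) =====
-- def is_suspicious(prompt):
--     suspicious_keywords = {
--         "debug",
--         "maintenance",
--         "internal variables",
--         "hidden configuration",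
--         "system prompt",
--         "secret_token",
--         "secret token",
--         "override",
--         "ignore previous",
--     }
--     lengths = {len(k) for k in suspicious_keywords}
--     p = prompt.lower()
--     # sliding fixed-length windows: for each distinct keyword length n, test every
--     # window p[i:i+n] for membership in the keyword set
--     return any(p[i:i + n] in suspicious_keywords
--                for n in lengths
--                for i in range(len(p) + 1 - n))
-- ===== Notes on version B (the rewrite author's own statement) =====
-- stated objective: alternative
-- what changed: Instead of scanning the prompt once per keyword with substring search, B collects the distinct keyword lengths and tests each fixed-length window of the lowercased prompt for membership in a keyword set.
import Mathlib
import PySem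

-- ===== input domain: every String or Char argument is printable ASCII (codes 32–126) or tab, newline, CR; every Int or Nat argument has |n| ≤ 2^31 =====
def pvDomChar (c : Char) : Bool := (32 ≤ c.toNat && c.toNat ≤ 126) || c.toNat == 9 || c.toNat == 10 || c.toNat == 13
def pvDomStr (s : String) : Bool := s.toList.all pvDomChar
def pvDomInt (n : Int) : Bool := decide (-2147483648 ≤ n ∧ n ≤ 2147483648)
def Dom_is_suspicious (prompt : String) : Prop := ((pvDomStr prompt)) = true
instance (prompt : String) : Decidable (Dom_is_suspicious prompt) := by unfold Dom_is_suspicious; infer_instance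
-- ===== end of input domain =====

-- B replaces A's per-keyword substring scans by a fixed-length sliding-window check against a keyword set; objective: alternative, same cost.

-- ===== PORT A =====
def is_suspicious (prompt : String) : Bool :=
  let suspicious_keywords : List String :=
    ["debug", "maintenance", "internal variables", "hidden configuration",
     "system prompt", "secret_token", "secret token", "override", "ignore previous"]
  let prompt_lower := PySem.Str.lower prompt
  suspicious_keywords.any (fun k => PySem.Str.isIn k prompt_lower)

-- ===== PORT B =====
-- p[i:i+n] with 0 ≤ i and window width n is exactly take n (drop i) on the chars (Python slices clamp).
def is_suspicious_alt (prompt : String) : Bool :=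
  let suspicious_keywords : PySem.Set String := PySem.Set.ofList
    ["debug", "maintenance", "internal variables", "hidden configuration",
     "system prompt", "secret_token", "secret token", "override", "ignore previous"]
  let lengths : PySem.Set Nat :=
    PySem.Set.ofList (suspicious_keywords.map (fun k => k.toList.length))
  let p := (PySem.Str.lower prompt).toList
  lengths.any (fun n =>
    (List.range (p.length + 1 - n)).any (fun i =>
      PySem.Set.contains suspicious_keywords (String.ofList ((p.drop i).take n))))

-- ===== PRECONDITION & SPEC =====
def Spec_is_suspicious (prompt : String) (out : Bool) : Prop := out = is_suspicious_alt prompt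
instance (prompt : String) (out : Bool) : Decidable (Spec_is_suspicious prompt out) := by unfold Spec_is_suspicious; infer_instance

-- ===== CLAIM (what is proved, stated in full; the proofs are below) =====
def Claim_equal_is_suspicious : Prop := ∀ (prompt : String), Dom_is_suspicious prompt → Spec_is_suspicious prompt (is_suspicious prompt)

-- ===== LEMMAS AND PROOFS =====
-- 'some keyword occurs as a substring' = 'some fixed-length window equals some keyword'
theorem pv_window_eq (kws : List String) (pl : List Char) :
    kws.any (fun k => PySem.Chars.isIn k.toList pl) =
    (PySem.Set.ofList (kws.map (fun k => k.toList.length))).any (fun n =>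
      (List.range (pl.length + 1 - n)).any (fun i =>
        PySem.Set.contains kws (String.ofList ((pl.drop i).take n)))) := by
  rw [Bool.eq_iff_iff]
  simp only [List.any_eq_true, PySem.Set.contains, List.contains_iff_mem,
    PySem.Set.mem_ofList, List.mem_map, List.mem_range]
  constructor
  · rintro ⟨k, hk, hin⟩
    obtain ⟨j, hpre⟩ := (PySem.Chars.exists_prefix_drop_iff_isIn k.toList pl).mpr hin
    have hlen : k.toList.length ≤ (pl.drop j).length := hpre.length_le
    have hjd : (pl.drop j).length = pl.length - j := List.length_drop
    have htake : k.toList = (pl.drop j).take k.toList.length :=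
      List.prefix_iff_eq_take.mp hpre
    by_cases hj : j ≤ pl.length
    · refine ⟨k.toList.length, ⟨k, hk, rfl⟩, j, by omega, ?_⟩
      rw [← htake, String.ofList_toList]; exact hk
    · -- drop j is empty, so k is the empty string: window at 0 of width 0
      have h0 : k.toList = [] := by
        have : (pl.drop j).length = 0 := by omega
        have := List.eq_nil_of_length_eq_zero this
        simpa [this] using htake
      refine ⟨k.toList.length, ⟨k, hk, rfl⟩, 0, by simp [h0], ?_⟩
      simp only [h0, List.length_nil, List.take_zero]
      rw [show ([] : List Char) = k.toList from h0.symm, String.ofList_toList]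
      exact hk
  · rintro ⟨n, _, i, _, hm⟩
    refine ⟨String.ofList ((pl.drop i).take n), hm, ?_⟩
    apply (PySem.Chars.exists_prefix_drop_iff_isIn _ pl).mp
    exact ⟨i, by rw [String.toList_ofList]; exact List.take_prefix n (pl.drop i)⟩

-- ===== VERDICT (by name: the statement is the Claim_ definition above) =====
theorem is_suspicious_spec : Claim_equal_is_suspicious := by
  intro prompt _
  unfold Spec_is_suspicious is_suspicious is_suspicious_alt
  simp only [PySem.Str.isIn_eq, PySem.Str.toList_lower]
  exact pv_window_eq _ _
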